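-- pv_equiv track=rewrite | github.com/kumtaek/ktohRep | phase1/utils/confidence_calculator.py | _calculate_nesting_level
-- ===== SOURCE A (Python) =====
-- def _calculate_nesting_level(code_content: str) -> int:
--     """코드의 최대 중첩 레벨 계산"""
--     max_level = 0
--     current_level = 0
--
--     for char in code_content:
--         if char == '{':
--             current_level += 1
--             max_level = max(max_level, current_level)
--         elif char == '}':
--             current_level = max(0, current_level - 1)
--
--     return max_level
-- ===== SOURCE B (Python) =====
-- def _calculate_nesting_level(code_content: str) -> int:
--     """Parse blocks with a stack of per-level maxima: each closed block folds
--     its inner maximum into the parent; unclosed blocks are folded at the end."""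
--     stack = []
--     best = 0
--     for char in code_content:
--         if char == '{':
--             stack.append(best)
--             best = 0
--         elif char == '}':
--             if stack:
--                 best = max(stack.pop(), best + 1)
--     for outer in reversed(stack):
--         best = max(outer, best + 1)
--     return best
-- ===== Notes on version B (the rewrite author's own statement) =====
-- stated objective: alternative
-- what changed: Replaces the flat clamped depth counter with a block-structure parse: a stack holds the best nesting seen at each open level, each closing brace folds the closed block's maximum into its parent as inner+1, and unclosed blocks are folded in a final unwind pass.
import Mathlib
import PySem

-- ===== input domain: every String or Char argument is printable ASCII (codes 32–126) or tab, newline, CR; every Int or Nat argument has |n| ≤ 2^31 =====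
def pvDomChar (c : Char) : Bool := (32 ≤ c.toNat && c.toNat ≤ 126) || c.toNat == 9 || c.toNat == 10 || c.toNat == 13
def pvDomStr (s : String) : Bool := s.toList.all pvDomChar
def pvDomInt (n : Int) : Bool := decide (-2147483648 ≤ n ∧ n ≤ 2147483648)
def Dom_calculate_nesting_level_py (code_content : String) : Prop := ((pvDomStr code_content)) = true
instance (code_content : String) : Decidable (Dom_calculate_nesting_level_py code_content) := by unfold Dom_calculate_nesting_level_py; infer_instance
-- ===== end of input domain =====

-- B parses the brace block structure with a stack of per-level maxima instead of A's clamped depth counter (alternative decomposition, same O(n) cost).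
-- ===== PORT A =====
-- A: running clamped depth counter with a running max, step for step.
def pvStepA (s : Int × Int) (c : Char) : Int × Int :=
  if c = '{' then (max s.1 (s.2 + 1), s.2 + 1)
  else if c = '}' then (s.1, max 0 (s.2 - 1))
  else s

def calculate_nesting_level_py (code_content : String) : Int :=
  (code_content.toList.foldl pvStepA (0, 0)).1

-- ===== PORT B =====
-- B: stack of per-level bests; '}' folds the closed block into its parent; final unwind folds unclosed blocks.
def pvStepB (s : List Int × Int) (c : Char) : List Int × Int :=
  if c = '{' then (s.2 :: s.1, 0)
  else if c = '}' then
    match s.1 with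
    | [] => s
    | b :: rest => (rest, max b (s.2 + 1))
  else s

def pvUnwind (stack : List Int) (best : Int) : Int :=
  stack.foldl (fun best outer => max outer (best + 1)) best

def calculate_nesting_level_py_alt (code_content : String) : Int :=
  let s := code_content.toList.foldl pvStepB ([], 0)
  pvUnwind s.1 s.2

-- ===== PRECONDITION & SPEC =====
def Spec_calculate_nesting_level_py (code_content : String) (out : Int) : Prop := out = calculate_nesting_level_py_alt code_content
instance (code_content : String) (out : Int) : Decidable (Spec_calculate_nesting_level_py code_content out) := by unfold Spec_calculate_nesting_level_py; infer_instance

-- ===== CLAIM (what is proved, stated in full; the proofs are below) =====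
def Claim_equal_calculate_nesting_level_py : Prop := ∀ (code_content : String), Dom_calculate_nesting_level_py code_content → Spec_calculate_nesting_level_py code_content (calculate_nesting_level_py code_content)

-- ===== LEMMAS AND PROOFS =====

-- pvUnwind as a function of its accumulator, for nonnegative accumulators
lemma pv_unwind_char (st : List Int) (x : Int) (hx : 0 ≤ x) :
    pvUnwind st x = max (pvUnwind st 0) (x + st.length) := by
  induction st generalizing x with
  | nil => simp [pvUnwind]; omega
  | cons b st ih =>
    simp only [pvUnwind, List.foldl] at *
    rw [ih (max b (x + 1)) (by omega), ih (max b (0 + 1)) (by omega)]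
    simp only [List.length_cons]
    push_cast
    omega

-- main invariant: A's (max, level) state equals (pvUnwind st cur, |st|) for B's state (st, cur)
lemma pv_fold_eq (l : List Char) (st : List Int) (cur : Int) (hcur : 0 ≤ cur) :
    (l.foldl pvStepA (pvUnwind st cur, (st.length : Int))).1 =
    pvUnwind (l.foldl pvStepB (st, cur)).1 (l.foldl pvStepB (st, cur)).2 := by
  induction l generalizing st cur with
  | nil => simp
  | cons c l ih =>
    simp only [List.foldl, pvStepA, pvStepB]
    by_cases hc : c = '{'
    · simp only [hc, reduceIte]
      have e1 : max (pvUnwind st cur) ((st.length : Int) + 1) = pvUnwind (cur :: st) 0 := by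
        have h0 : pvUnwind (cur :: st) 0 = pvUnwind st (max cur (0 + 1)) := rfl
        rw [h0, pv_unwind_char st (max cur (0 + 1)) (by omega), pv_unwind_char st cur hcur]
        push_cast
        omega
      have e2 : (st.length : Int) + 1 = ((cur :: st).length : Int) := by
        simp only [List.length_cons]; push_cast; omega
      rw [e1, e2]
      exact ih (cur :: st) 0 le_rfl
    · by_cases hd : c = '}'
      · simp only [hd, reduceIte, show ('}' = '{') = False from by decide, if_false]
        cases st with
        | nil =>
          have : max 0 (([] : List Int).length - 1 : Int) = (([] : List Int).length : Int) := by simp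
          rw [this]
          exact ih [] cur hcur
        | cons b rest =>
          have e1 : max 0 (((b :: rest).length : Int) - 1) = (rest.length : Int) := by
            simp only [List.length_cons]; push_cast; omega
          have e2 : pvUnwind (b :: rest) cur = pvUnwind rest (max b (cur + 1)) := rfl
          rw [e1, e2]
          exact ih rest (max b (cur + 1)) (by omega)
      · simp only [if_neg hc, if_neg hd]
        exact ih st cur hcur

-- ===== VERDICT (by name: the statement is the Claim_ definition above) =====
theorem calculate_nesting_level_py_spec : Claim_equal_calculate_nesting_level_py := by
  intro code_content _
  unfold Spec_calculate_nesting_level_py calculate_nesting_level_py calculate_nesting_level_py_alt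
  have := pv_fold_eq code_content.toList [] 0 le_rfl
  simpa [pvUnwind] using this
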